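-- pv_equiv track=rewrite | github.com/Andvc/Text-Adventure | ai/prompt_processor.py | _build_json_template
-- ===== SOURCE A (Python) =====
-- from typing import List, Dict, Any, Optional, Tuple
--
-- def _build_json_template(fields_content: Dict[str, Tuple[str, str]]) -> str:
--     """
--     构建包含类型和三引号描述的JSON模板
--
--     Args:
--         fields_content: 字段名到(类型,内容)元组的映射
--
--     Returns:
--         JSON格式的模板字符串，包含三引号描述
--     """
--     lines = ["{"]
--
--     fields = list(fields_content.keys())
--     for i, field in enumerate(fields):
--         field_type, content = fields_content[field]
--
--         # 添加字段和类型
--         lines.append(f'  "{field}": "{field_type}"')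
--
--         # 添加三引号描述
--         if content:
--             lines.append(f'  """{content}"""')
--
--         # 添加逗号（除了最后一个字段）
--         if i < len(fields) - 1:
--             lines[-1] += ','
--
--     lines.append("}")
--     return "\n".join(lines)
-- ===== SOURCE B (Python) =====
-- def _build_json_template(fields_content):
--     # Build the result back-to-front: walk the fields in reverse, keeping the
--     # already-built suffix of the output; a comma is needed after a field
--     # exactly when something has already been accumulated behind it.
--     out = "}"
--     comma = ""
--     for field, (field_type, content) in reversed(list(fields_content.items())):
--         piece = f'  "{field}": "{field_type}"'
--         if content:
--             piece += f'\n  """{content}"""'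
--         out = piece + comma + "\n" + out
--         comma = ","
--     return "{\n" + out
-- ===== Notes on version B (the rewrite author's own statement) =====
-- stated objective: alternative
-- what changed: B constructs the output back-to-front: it iterates over the fields in reverse, prepending each field's piece to a growing suffix string with a comma flag, which removes A's lines list, the final join, and the index-based trailing-comma mutation, and needs no empty-dict special case.
import Mathlib
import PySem

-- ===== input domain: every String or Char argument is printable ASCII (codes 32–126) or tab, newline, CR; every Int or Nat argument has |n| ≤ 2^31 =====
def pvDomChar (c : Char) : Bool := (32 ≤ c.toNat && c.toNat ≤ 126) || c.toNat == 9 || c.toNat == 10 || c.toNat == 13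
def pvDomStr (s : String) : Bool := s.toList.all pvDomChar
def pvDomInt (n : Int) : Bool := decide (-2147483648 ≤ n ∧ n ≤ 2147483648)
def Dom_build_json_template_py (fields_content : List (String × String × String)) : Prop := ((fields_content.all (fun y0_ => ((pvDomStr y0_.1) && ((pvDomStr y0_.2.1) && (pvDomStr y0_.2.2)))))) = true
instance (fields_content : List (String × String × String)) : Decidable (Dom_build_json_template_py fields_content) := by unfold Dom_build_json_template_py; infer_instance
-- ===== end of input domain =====

-- B builds the output back-to-front, prepending each field's piece to a growing
-- suffix string with a comma flag, instead of A's forward lines list with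
-- index-based trailing-comma mutation and a final join.

-- ===== PORT A =====
-- the dict argument arrives as an association list, folded into a PySem.Dict
-- (a later duplicate key overwrites in place, as in Python's dict construction)
def build_json_template_py (fields_content : List (String × String × String)) : String :=
  let d : PySem.Dict String (String × String) :=
    fields_content.foldl (fun d p => d.insert p.1 p.2) PySem.Dict.empty
  let fields := d.keys
  let lines :=
    (PySem.List.enumerate fields 0).foldl (fun lines ip =>
      -- field_type, content = fields_content[field]  (the key is always present, so
      -- the getD default is never used; KeyError cannot happen)
      let ftc := d.getD ip.2 ("", "")
      let lines := lines ++ ["  \"" ++ ip.2 ++ "\": \"" ++ ftc.1 ++ "\""]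
      let lines := if ftc.2 ≠ "" then lines ++ ["  \"\"\"" ++ ftc.2 ++ "\"\"\""] else lines
      -- lines[-1] += ','  (only before the last field)
      if ip.1 < (fields.length : Int) - 1 then
        lines.dropLast ++ [PySem.List.pyGetD lines (-1) "" ++ ","]
      else lines)
      ["{"]
  PySem.Str.join "\n" (lines ++ ["}"])

-- ===== PORT B =====
def build_json_template_py_alt (fields_content : List (String × String × String)) : String :=
  let d : PySem.Dict String (String × String) :=
    fields_content.foldl (fun d p => d.insert p.1 p.2) PySem.Dict.empty
  -- 'for … in reversed(items)' with the (out, comma) accumulator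
  let st := d.items.reverse.foldl (fun (st : String × String) p =>
    let piece := "  \"" ++ p.1 ++ "\": \"" ++ p.2.1 ++ "\""
    let piece := if p.2.2 ≠ "" then piece ++ "\n  \"\"\"" ++ p.2.2 ++ "\"\"\"" else piece
    (piece ++ st.2 ++ "\n" ++ st.1, ",")) ("}", "")
  "{\n" ++ st.1

-- ===== PRECONDITION & SPEC =====
def Spec_build_json_template_py (fields_content : List (String × String × String)) (out : String) : Prop := out = build_json_template_py_alt fields_content
instance (fields_content : List (String × String × String)) (out : String) : Decidable (Spec_build_json_template_py fields_content out) := by unfold Spec_build_json_template_py; infer_instance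

-- ===== CLAIM (what is proved, stated in full; the proofs are below) =====
def Claim_equal_build_json_template_py : Prop := ∀ (fields_content : List (String × String × String)), Dom_build_json_template_py fields_content → Spec_build_json_template_py fields_content (build_json_template_py fields_content)

-- ===== LEMMAS AND PROOFS =====

-- the interior lines A's loop produces: each field's lines, a comma after each field but the last
def pvBody (g : String → String × String) : List String → List String
  | [] => []
  | [k] => ("  \"" ++ k ++ "\": \"" ++ (g k).1 ++ "\"") ::
      (if (g k).2 ≠ "" then ["  \"\"\"" ++ (g k).2 ++ "\"\"\""] else [])
  | k :: k' :: ks =>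
      (if (g k).2 ≠ "" then
        ["  \"" ++ k ++ "\": \"" ++ (g k).1 ++ "\"", "  \"\"\"" ++ (g k).2 ++ "\"\"\"" ++ ","]
      else ["  \"" ++ k ++ "\": \"" ++ (g k).1 ++ "\"" ++ ","]) ++ pvBody g (k' :: ks)

-- the piece B builds for one field (the if-form the port's loop computes)
def pvF (p : String × String × String) : String :=
  if p.2.2 ≠ "" then
    "  \"" ++ p.1 ++ "\": \"" ++ p.2.1 ++ "\"" ++ "\n  \"\"\"" ++ p.2.2 ++ "\"\"\""
  else "  \"" ++ p.1 ++ "\": \"" ++ p.2.1 ++ "\""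

-- the suffix B's reverse loop has built once all of 'items' has been consumed
def pvS : List (String × String × String) → String
  | [] => "}"
  | p :: ps => pvF p ++ (if ps = [] then "" else ",") ++ "\n" ++ pvS ps

lemma pv_last2 (xs : List String) (a b : String) :
    PySem.List.pyGetD (xs ++ [a, b]) (-1) "" = b := by
  rw [show xs ++ [a, b] = (xs ++ [a]) ++ [b] by simp]
  exact PySem.List.pyGetD_neg_one_append_singleton _ _ _

lemma pv_fold (d : PySem.Dict String (String × String)) (n : Int) :
    ∀ (ks : List String) (s : Int) (acc : List String), s + ks.length = n →
    (PySem.List.enumerate ks s).foldl (fun lines ip =>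
      if ip.1 < n - 1 then
        (if (d.getD ip.2 ("", "")).2 ≠ "" then
          (lines ++ ["  \"" ++ ip.2 ++ "\": \"" ++ (d.getD ip.2 ("", "")).1 ++ "\""])
            ++ ["  \"\"\"" ++ (d.getD ip.2 ("", "")).2 ++ "\"\"\""]
        else lines ++ ["  \"" ++ ip.2 ++ "\": \"" ++ (d.getD ip.2 ("", "")).1 ++ "\""]).dropLast
          ++ [PySem.List.pyGetD
            (if (d.getD ip.2 ("", "")).2 ≠ "" then
              (lines ++ ["  \"" ++ ip.2 ++ "\": \"" ++ (d.getD ip.2 ("", "")).1 ++ "\""])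
                ++ ["  \"\"\"" ++ (d.getD ip.2 ("", "")).2 ++ "\"\"\""]
            else lines ++ ["  \"" ++ ip.2 ++ "\": \"" ++ (d.getD ip.2 ("", "")).1 ++ "\""]) (-1) "" ++ ","]
      else
        (if (d.getD ip.2 ("", "")).2 ≠ "" then
          (lines ++ ["  \"" ++ ip.2 ++ "\": \"" ++ (d.getD ip.2 ("", "")).1 ++ "\""])
            ++ ["  \"\"\"" ++ (d.getD ip.2 ("", "")).2 ++ "\"\"\""]
        else lines ++ ["  \"" ++ ip.2 ++ "\": \"" ++ (d.getD ip.2 ("", "")).1 ++ "\""])) acc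
    = acc ++ pvBody (fun k => d.getD k ("", "")) ks := by
  intro ks
  induction ks with
  | nil => intro s acc h; simp [PySem.List.enumerate, pvBody]
  | cons k ks ih =>
    intro s acc h
    rw [PySem.List.enumerate_cons, List.foldl_cons]
    cases ks with
    | nil =>
      have hs : ¬ (s < n - 1) := by simp at h; omega
      simp only [hs, if_false, PySem.List.enumerate, List.foldl_nil, pvBody]
      split <;> simp
    | cons k' ks' =>
      have hs : s < n - 1 := by simp at h; omega
      have h' : (s + 1) + (k' :: ks').length = n := by simp at h ⊢; omega
      simp only [hs, if_true]
      split
      · rw [show ((acc ++ ["  \"" ++ k ++ "\": \"" ++ (d.getD k ("", "")).1 ++ "\""])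
              ++ ["  \"\"\"" ++ (d.getD k ("", "")).2 ++ "\"\"\""]) = acc
              ++ ["  \"" ++ k ++ "\": \"" ++ (d.getD k ("", "")).1 ++ "\"",
                  "  \"\"\"" ++ (d.getD k ("", "")).2 ++ "\"\"\""] by simp,
            pv_last2, ih (s + 1) _ h']
        simp_all [pvBody]
      · rw [PySem.List.pyGetD_neg_one_append_singleton, ih (s + 1) _ h']
        simp_all [pvBody]

-- B's reverse foldl, turned into a foldr, computes pvS together with the comma flag
lemma pv_foldr (items : List (String × String × String)) :
    items.foldr (fun p (st : String × String) => (pvF p ++ st.2 ++ "\n" ++ st.1, ","))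
      ("}", "")
    = (pvS items, if items = [] then "" else ",") := by
  induction items with
  | nil => simp [pvS]
  | cons p ps ih =>
    rw [List.foldr_cons, ih]
    simp only [pvS]
    cases ps <;> simp

lemma pv_join_cons (sep p : List Char) (rest : List (List Char)) (h : rest ≠ []) :
    PySem.Chars.join sep (p :: rest) = p ++ sep ++ PySem.Chars.join sep rest := by
  cases rest with
  | nil => exact absurd rfl h
  | cons q r => exact PySem.Chars.join_cons_cons sep p q r

-- pvS over the keys equals A's joined body-and-closing-brace
lemma pv_chars (g : String → String × String) :
    ∀ (ks : List String),
    (pvS (ks.map (fun k => (k, g k)))).toList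
      = PySem.Chars.join ['\n'] ((pvBody g ks).map String.toList ++ [['}']]) := by
  intro ks
  induction ks with
  | nil => simp [pvS, pvBody, PySem.Chars.join_singleton]
  | cons k ks ih =>
    cases ks with
    | nil =>
      simp only [List.map_cons, List.map_nil, pvS, pvF, pvBody]
      split <;>
        simp [PySem.Chars.join_cons_cons, PySem.Chars.join_singleton]
    | cons k' ks' =>
      have hne : (pvBody g (k' :: ks')).map String.toList ++ [['}']] ≠ [] := by simp
      have hstep : pvS ((k, g k) :: (k', g k') :: ks'.map (fun k => (k, g k)))
          = pvF (k, g k) ++ "," ++ "\n" ++ pvS ((k', g k') :: ks'.map (fun k => (k, g k))) := by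
        simp [pvS]
      rw [List.map_cons, List.map_cons, hstep,
        show pvBody g (k :: k' :: ks') =
          (if (g k).2 ≠ "" then
            ["  \"" ++ k ++ "\": \"" ++ (g k).1 ++ "\"", "  \"\"\"" ++ (g k).2 ++ "\"\"\"" ++ ","]
          else ["  \"" ++ k ++ "\": \"" ++ (g k).1 ++ "\"" ++ ","]) ++ pvBody g (k' :: ks') from rfl,
        show pvF (k, g k) =
          (if (g k).2 ≠ "" then
            "  \"" ++ k ++ "\": \"" ++ (g k).1 ++ "\"" ++ "\n  \"\"\"" ++ (g k).2 ++ "\"\"\""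
          else "  \"" ++ k ++ "\": \"" ++ (g k).1 ++ "\"") from rfl]
      simp only [List.map_cons] at ih
      by_cases hc : (g k).2 ≠ ""
      · rw [if_pos hc, if_pos hc]
        simp only [List.map_cons, List.cons_append, List.nil_append,
          PySem.Chars.join_cons_cons]
        rw [pv_join_cons _ _ _ hne]
        simp [ih]
      · rw [if_neg hc, if_neg hc]
        simp only [List.map_cons, List.cons_append, List.nil_append]
        rw [pv_join_cons _ _ _ hne]
        simp [ih]

-- ===== VERDICT (by name: the statement is the Claim_ definition above) =====
theorem build_json_template_py_spec : Claim_equal_build_json_template_py := by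
  intro fc _
  simp only [Spec_build_json_template_py, build_json_template_py, build_json_template_py_alt]
  set d : PySem.Dict String (String × String) :=
    fc.foldl (fun d p => d.insert p.1 p.2) PySem.Dict.empty with hd
  have hnd : d.keys.Nodup := by
    rw [hd]
    exact PySem.Dict.nodup_keys_foldl_insert_key fc Prod.fst (fun _ p => p.2) _
      (by simp [PySem.Dict.keys_empty])
  have hitems : d.items = d.keys.map (fun k => (k, d.getD k ("", ""))) :=
    PySem.Dict.items_eq_map_keys d hnd ("", "")
  rw [pv_fold d (d.keys.length : Int) d.keys 0 ["{"] (by simp), hitems, List.foldl_reverse]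
  have hfold := pv_foldr (d.keys.map (fun k => (k, d.getD k ("", ""))))
  simp only [pvF] at hfold
  rw [hfold]
  apply String.toList_inj.mp
  rw [PySem.Str.toList_join]
  simp only [List.map_cons, List.map_append, List.map_nil, List.cons_append, List.nil_append]
  rw [show ("{" : String).toList = ['{'] from rfl, show ("\n" : String).toList = ['\n'] from rfl]
  rw [pv_join_cons ['\n'] ['{'] _ (by simp)]
  have hch := pv_chars (fun k => d.getD k ("", "")) d.keys
  simp [hch]
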